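-- pv_equiv track=rewrite | github.com/Emily-Steel/AdventOfCode | 2025/Day1/part1.py | part1
-- ===== SOURCE A (Python) =====
-- def part1(input_data):
--     zeros = 0
--     dial_position = 50
--     for line in input_data:
--         direction = line[0] == "L" and -1 or 1
--         amount = int(line[1:])
--         dial_position = (dial_position + direction * amount) % 100
--         if dial_position == 0:
--             zeros += 1
--     return zeros
-- ===== SOURCE B (Python) =====
-- def part1(input_data):
--     # Divide and conquer: for a block of lines started at dial residue `start`,
--     # return (zero hits inside the block, net signed offset of the block).
--     # Halves combine: right half starts at start + left's net offset.
--     def signed(line):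
--         return -int(line[1:]) if line[0] == "L" else int(line[1:])
--
--     def solve(lo, hi, start):
--         if hi - lo == 1:
--             d = signed(input_data[lo])
--             return (1 if (start + d) % 100 == 0 else 0, d)
--         mid = (lo + hi) // 2
--         z1, s1 = solve(lo, mid, start)
--         z2, s2 = solve(mid, hi, start + s1)
--         return (z1 + z2, s1 + s2)
--
--     if not input_data:
--         return 0
--     return solve(0, len(input_data), 50)[0]
-- ===== Notes on version B (the rewrite author's own statement) =====
-- stated objective: alternative
-- what changed: B replaces A's single left-to-right rolling mod-100 dial loop with a divide-and-conquer recursion: each half-block returns a (zero-hit count, net signed offset) pair and the two halves are combined by offsetting the right half's start by the left half's net offset.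
import Mathlib
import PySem

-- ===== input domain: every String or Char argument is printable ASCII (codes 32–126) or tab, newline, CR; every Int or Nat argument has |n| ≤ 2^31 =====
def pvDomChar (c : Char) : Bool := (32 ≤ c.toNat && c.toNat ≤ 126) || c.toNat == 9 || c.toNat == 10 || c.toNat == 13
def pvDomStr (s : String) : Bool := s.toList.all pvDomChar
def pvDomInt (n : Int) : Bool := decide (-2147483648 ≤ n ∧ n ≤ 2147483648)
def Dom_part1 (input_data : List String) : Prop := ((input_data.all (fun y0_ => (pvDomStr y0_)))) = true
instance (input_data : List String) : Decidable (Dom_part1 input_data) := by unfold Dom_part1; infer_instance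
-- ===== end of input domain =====

-- B is a divide-and-conquer recursion combining (zero-hit count, net offset) pairs per half,
-- instead of A's single rolling mod-100 dial loop; return values proved equal on inputs where A raises no exception.

-- ===== PORT A =====
def part1 (input_data : List String) : Int :=
  (input_data.foldl (fun (st : Int × Int) line =>
      let direction : Int := if PySem.Str.pyGet? line 0 = some 'L' then -1 else 1
      let amount : Int := (PySem.Int.ofStr? (PySem.Str.slice line (some 1) none)).getD 0
      let dial := PySem.Int.mod (st.2 + direction * amount) 100
      (st.1 + (if dial = 0 then 1 else 0), dial))
    (0, 50)).1

-- ===== PORT B =====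
def pvSigned (line : String) : Int :=
  if PySem.Str.pyGet? line 0 = some 'L' then
    -((PySem.Int.ofStr? (PySem.Str.slice line (some 1) none)).getD 0)
  else
    (PySem.Int.ofStr? (PySem.Str.slice line (some 1) none)).getD 0

-- Source B's solve(lo, hi, start), with the block lines[lo:hi] passed as a list
-- (solve is never called on an empty block; the [] case is unreachable filler).
def pvSolve : List String → Int → Int × Int
  | [], _ => (0, 0)
  | [l], start =>
      let d := pvSigned l
      ((if PySem.Int.mod (start + d) 100 = 0 then 1 else 0), d)
  | l1 :: l2 :: rest, start =>
      let ls := l1 :: l2 :: rest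
      let mid := ls.length / 2
      let p1 := pvSolve (ls.take mid) start
      let p2 := pvSolve (ls.drop mid) (start + p1.2)
      (p1.1 + p2.1, p1.2 + p2.2)
termination_by ls _ => ls.length
decreasing_by
  · simp only [List.length_take, List.length_cons]; omega
  · simp only [List.length_drop, List.length_cons]; omega

def part1_alt (input_data : List String) : Int :=
  if input_data = [] then 0 else (pvSolve input_data 50).1

-- ===== PRECONDITION & SPEC =====
-- Pre_ excludes exactly the inputs where A raises: an empty line (IndexError on line[0])
-- or a line whose tail is not a valid int literal (ValueError from int(line[1:])).
def Pre_part1 (input_data : List String) : Prop :=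
  ∀ line ∈ input_data,
    line ≠ "" ∧ (PySem.Int.ofStr? (PySem.Str.slice line (some 1) none)).isSome = true

instance (input_data : List String) : Decidable (Pre_part1 input_data) := by
  unfold Pre_part1; infer_instance
def pvWitness_part1 : List String := ["L50", "R25", "L75"]

def Spec_part1 (input_data : List String) (out : Int) : Prop := out = part1_alt input_data
instance (input_data : List String) (out : Int) : Decidable (Spec_part1 input_data out) := by
  unfold Spec_part1; infer_instance

-- ===== CLAIM (what is proved, stated in full; the proofs are below) =====
def Claim_equal_part1 : Prop := ∀ (input_data : List String), Dom_part1 input_data → Pre_part1 input_data → Spec_part1 input_data (part1 input_data)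

-- ===== LEMMAS AND PROOFS =====

-- prefix sums of the deltas starting from s
def pvScan (s : Int) : List Int → List Int
  | [] => []
  | d :: ds => (s + d) :: pvScan (s + d) ds

-- number of prefix sums that are ≡ 0 (mod 100)
def pvZc (s : Int) (ds : List Int) : Int :=
  ((pvScan s ds).map (fun o => if PySem.Int.mod o 100 = 0 then (1 : Int) else 0)).sum

lemma pvScan_append (a b : List Int) : ∀ s, pvScan s (a ++ b) = pvScan s a ++ pvScan (s + a.sum) b := by
  induction a with
  | nil => intro s; simp [pvScan]
  | cons d a ih =>
    intro s
    simp only [List.cons_append, pvScan, List.sum_cons, ih (s + d)]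
    ring_nf

lemma pvZc_append (s : Int) (a b : List Int) :
    pvZc s (a ++ b) = pvZc s a + pvZc (s + a.sum) b := by
  simp [pvZc, pvScan_append]

lemma pvSolve_eq_aux (n : Nat) : ∀ (ls : List String), ls.length ≤ n → ∀ (start : Int),
    pvSolve ls start = (pvZc start (ls.map pvSigned), (ls.map pvSigned).sum) := by
  induction n with
  | zero =>
    intro ls h start
    cases ls with
    | nil => simp [pvSolve, pvZc, pvScan]
    | cons a as => simp at h
  | succ n ih =>
    intro ls h start
    match ls with
    | [] => simp [pvSolve, pvZc, pvScan]
    | [l] => simp [pvSolve, pvZc, pvScan]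
    | l1 :: l2 :: rest =>
      simp only [pvSolve]
      have h1 : ((l1 :: l2 :: rest).take ((l1 :: l2 :: rest).length / 2)).length ≤ n := by
        simp only [List.length_take, List.length_cons] at *; omega
      have h2 : ((l1 :: l2 :: rest).drop ((l1 :: l2 :: rest).length / 2)).length ≤ n := by
        simp only [List.length_drop, List.length_cons] at *; omega
      rw [ih _ h1, ih _ h2]
      rw [← pvZc_append, ← List.sum_append, List.map_take, List.map_drop, List.take_append_drop]

lemma pvSolve_eq (ls : List String) (start : Int) :
    pvSolve ls start = (pvZc start (ls.map pvSigned), (ls.map pvSigned).sum) :=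
  pvSolve_eq_aux ls.length ls (le_refl _) start

lemma pvMod_shift (s d : Int) :
    PySem.Int.mod (PySem.Int.mod s 100 + d) 100 = PySem.Int.mod (s + d) 100 := by
  simp only [PySem.Int.mod_eq_emod_of_pos (show (0:Int) < 100 by omega)]
  omega

lemma partA_fold (ds : List Int) (z s : Int) :
    (ds.foldl (fun (st : Int × Int) d =>
        let dial := PySem.Int.mod (st.2 + d) 100
        (st.1 + (if dial = 0 then 1 else 0), dial)) (z, PySem.Int.mod s 100)).1
    = z + pvZc s ds := by
  induction ds generalizing z s with
  | nil => simp [pvZc, pvScan]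
  | cons d ds ih =>
    simp only [List.foldl_cons, pvZc, pvScan, List.map_cons, List.sum_cons, pvMod_shift]
    rw [ih (z + (if PySem.Int.mod (s + d) 100 = 0 then 1 else 0)) (s + d)]
    simp only [pvZc]
    ring

lemma partA_step_eq (st : Int × Int) (line : String) :
    (let direction : Int := if PySem.Str.pyGet? line 0 = some 'L' then -1 else 1
     let amount : Int := (PySem.Int.ofStr? (PySem.Str.slice line (some 1) none)).getD 0
     let dial := PySem.Int.mod (st.2 + direction * amount) 100
     ((st.1 + (if dial = 0 then 1 else 0), dial) : Int × Int))
    = (let dial := PySem.Int.mod (st.2 + pvSigned line) 100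
       (st.1 + (if dial = 0 then 1 else 0), dial)) := by
  simp only [pvSigned]
  by_cases h : PySem.List.pyGet? line.toList 0 = some 'L' <;> simp [h]

-- ===== VERDICT (by name: the statement is the Claim_ definition above) =====
theorem part1_spec : Claim_equal_part1 := by
  intro input_data _ _
  unfold Spec_part1 part1 part1_alt
  have hA : (input_data.foldl (fun (st : Int × Int) line =>
      let direction : Int := if PySem.Str.pyGet? line 0 = some 'L' then -1 else 1
      let amount : Int := (PySem.Int.ofStr? (PySem.Str.slice line (some 1) none)).getD 0
      let dial := PySem.Int.mod (st.2 + direction * amount) 100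
      (st.1 + (if dial = 0 then 1 else 0), dial)) (0, 50))
      = ((input_data.map pvSigned).foldl (fun (st : Int × Int) d =>
          let dial := PySem.Int.mod (st.2 + d) 100
          (st.1 + (if dial = 0 then 1 else 0), dial)) (0, 50)) := by
    rw [List.foldl_map]
    congr 1
    funext st line
    exact partA_step_eq st line
  rw [hA]
  have h50 : ((0 : Int), (50 : Int)) = ((0 : Int), PySem.Int.mod 50 100) := by
    rw [PySem.Int.mod_eq_emod_of_pos (show (0:Int) < 100 by omega)]
    norm_num
  rw [h50, partA_fold (input_data.map pvSigned) 0 50]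
  cases input_data with
  | nil => simp [pvZc, pvScan]
  | cons l ls => simp [pvSolve_eq]
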